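-- pv_equiv track=rewrite | github.com/tracysun27/genshin-wishes | genshin_wishes_functions.py | five_star_pity
-- ===== SOURCE A (Python) =====
-- def five_star_pity(user_list):
--     #if there is a 5 in the list,
--         #have one pointer at the first 5 in the list,
--         #and count the number of entries until you reach another 5. (reset)
--         #return number of entries after the 5.
--     #else if there is no 5 in the list,
--         #count from beginning of list.
--     user_pity = 0
--     for (index,entry) in enumerate(user_list):
--         if entry == '5':
--             user_pity = 0
--             continue
--         else:
--             user_pity += 1
--             continue
--     return user_pity
-- ===== SOURCE B (Python) =====
-- def five_star_pity(user_list):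
--     # reverse scan: count entries until the last '5'
--     count = 0
--     for entry in reversed(user_list):
--         if entry == '5':
--             break
--         count += 1
--     return count
-- ===== Notes on version B (the rewrite author's own statement) =====
-- stated objective: simpler
-- what changed: Instead of folding a counter over the whole list (reset to 0 at each '5'), B scans the list in reverse and counts entries until it hits the first '5' from the end, stopping early.
import Mathlib
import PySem

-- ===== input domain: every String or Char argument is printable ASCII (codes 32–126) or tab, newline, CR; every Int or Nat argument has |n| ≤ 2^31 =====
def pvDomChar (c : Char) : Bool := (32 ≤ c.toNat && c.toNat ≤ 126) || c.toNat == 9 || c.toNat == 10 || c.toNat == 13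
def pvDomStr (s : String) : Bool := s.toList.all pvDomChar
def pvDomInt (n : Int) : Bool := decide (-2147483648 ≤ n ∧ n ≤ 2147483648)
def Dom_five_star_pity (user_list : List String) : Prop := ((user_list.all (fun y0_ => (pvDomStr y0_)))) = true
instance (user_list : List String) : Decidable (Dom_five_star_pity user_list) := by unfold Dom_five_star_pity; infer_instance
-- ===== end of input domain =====

-- B replaces A's full fold (counter reset at each '5') by a reverse scan that counts until the last '5' — simpler, same cost.
-- ===== PORT A =====
def five_star_pity (user_list : List String) : Int :=
  user_list.foldl (fun user_pity entry => if entry = "5" then 0 else user_pity + 1) 0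

-- ===== PORT B =====
def fspAltGo : List String → Int
  | [] => 0
  | entry :: rest => if entry = "5" then 0 else fspAltGo rest + 1

def five_star_pity_alt (user_list : List String) : Int :=
  fspAltGo user_list.reverse

-- ===== PRECONDITION & SPEC =====
def Spec_five_star_pity (user_list : List String) (out : Int) : Prop := out = five_star_pity_alt user_list
instance (user_list : List String) (out : Int) : Decidable (Spec_five_star_pity user_list out) := by unfold Spec_five_star_pity; infer_instance

-- ===== CLAIM (what is proved, stated in full; the proofs are below) =====
def Claim_equal_five_star_pity : Prop := ∀ (user_list : List String), Dom_five_star_pity user_list → Spec_five_star_pity user_list (five_star_pity user_list)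

-- ===== LEMMAS AND PROOFS =====

-- ===== VERDICT (by name: the statement is the Claim_ definition above) =====
theorem fsp_foldl_eq (l : List String) :
    l.foldl (fun user_pity entry => if entry = "5" then 0 else user_pity + 1) 0 = fspAltGo l.reverse := by
  induction l using List.reverseRecOn with
  | nil => simp [fspAltGo]
  | append_singleton l e ih =>
    simp [List.foldl_append, fspAltGo, ih]

theorem five_star_pity_spec : Claim_equal_five_star_pity := by
  intro l _
  unfold Spec_five_star_pity five_star_pity five_star_pity_alt
  exact fsp_foldl_eq l
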